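-- pv_equiv track=rewrite | github.com/s-atanu-spec/adn-prime-framework | scripts/benchmark-script.py | rad
-- ===== SOURCE A (Python) =====
-- def rad(m: int) -> int:
--     if m == 0:
--         return 0
--     r = 1
--     x = m
--     p = 2
--     while p * p <= x:
--         if x % p == 0:
--             r *= p
--             while x % p == 0:
--                 x //= p
--         p = 3 if p == 2 else p + 2
--     if x > 1:
--         r *= x
--     return r
-- ===== SOURCE B (Python) =====
-- def rad(m: int) -> int:
--     if m == 0:
--         return 0
--     if m < 2:
--         return 1
--     return _go(m)
--
--
-- def _spf(n: int) -> int: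
--     """Smallest prime factor of n (n >= 2)."""
--     d = 2
--     while d * d <= n:
--         if n % d == 0:
--             return d
--         d += 1
--     return n
--
--
-- def _strip(p: int, n: int) -> int:
--     while n % p == 0:
--         n //= p
--     return n
--
--
-- def _go(n: int) -> int:
--     if n == 1:
--         return 1
--     p = _spf(n)
--     return p * _go(_strip(p, n))
-- ===== Notes on version B (the rewrite author's own statement) =====
-- stated objective: alternative
-- what changed: Replaces A's single accumulator loop over odd candidates (strip factors while scanning) with a recursion on the number: repeatedly find the smallest prime factor, strip it, and multiply the results back together top-down.
import Mathlib
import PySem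

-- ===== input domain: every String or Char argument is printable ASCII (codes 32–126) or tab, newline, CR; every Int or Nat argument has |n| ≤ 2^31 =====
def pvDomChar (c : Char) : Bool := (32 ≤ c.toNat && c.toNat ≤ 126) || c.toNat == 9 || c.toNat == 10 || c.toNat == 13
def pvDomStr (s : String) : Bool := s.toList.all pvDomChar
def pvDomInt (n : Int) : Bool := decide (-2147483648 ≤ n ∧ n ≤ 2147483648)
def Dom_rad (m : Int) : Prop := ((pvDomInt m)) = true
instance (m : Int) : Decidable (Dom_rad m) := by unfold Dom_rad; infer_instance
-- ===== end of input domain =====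

-- B replaces A's single accumulator loop over odd trial divisors by a recursion on the number
-- (smallest prime factor, strip, recurse); alternative structure, not claimed faster.

-- termination helper for the strip loops (cited by name in decreasing_by)
lemma pvStripDec (x p : Int) (h : 0 < x ∧ 2 ≤ p ∧ PySem.Int.mod x p = 0) :
    (PySem.Int.floordiv x p).toNat < x.toNat := by
  obtain ⟨hx, hp, _⟩ := h
  rw [PySem.Int.floordiv_eq_ediv_of_pos (by omega)]
  have h1 : x / p < x := Int.ediv_lt_of_lt_mul (by omega) (by nlinarith)
  have h2 : 0 ≤ x / p := Int.ediv_nonneg (by omega) (by omega)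
  omega

-- ===== PORT A =====
-- inner loop 'while x % p == 0: x //= p' (the extra 0 < x ∧ 2 ≤ p in the guard only makes it total)
def stripA (p x : Int) : Int :=
  if h : 0 < x ∧ 2 ≤ p ∧ PySem.Int.mod x p = 0 then stripA p (PySem.Int.floordiv x p) else x
termination_by x.toNat
decreasing_by exact pvStripDec x p h

-- cited by loopA's decreasing_by
lemma stripA_le (p x : Int) : stripA p x ≤ x := by
  induction hx : x.toNat using Nat.strong_induction_on generalizing x with
  | _ n ih =>
    rw [stripA]
    split
    · rename_i h
      have hd := pvStripDec x p h
      have := ih _ (hx ▸ hd) (PySem.Int.floordiv x p) rfl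
      have h2 : 0 ≤ PySem.Int.floordiv x p := by
        rw [PySem.Int.floordiv_eq_ediv_of_pos (by omega)]
        exact Int.ediv_nonneg (by omega) (by omega)
      omega
    · exact le_refl x

-- outer loop of A ('2 ≤ p' in the guard only for termination; the trailing 'if x > 1: r *= x' is the else)
def loopA (x p r : Int) : Int :=
  if h : p * p ≤ x ∧ 2 ≤ p then
    if PySem.Int.mod x p = 0 then
      loopA (stripA p x) (if p = 2 then 3 else p + 2) (r * p)
    else
      loopA x (if p = 2 then 3 else p + 2) r
  else if 1 < x then r * x else r
termination_by (x - p).toNat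
decreasing_by
  · obtain ⟨h1, h2⟩ := h
    have h3 : p + 2 ≤ x := by nlinarith
    have := stripA_le p x
    split <;> omega
  · obtain ⟨h1, h2⟩ := h
    have h3 : p + 2 ≤ x := by nlinarith
    split <;> omega

def rad (m : Int) : Int := if m = 0 then 0 else loopA m 2 1

-- ===== PORT B =====
-- _spf: d = 2; while d*d <= n: if n % d == 0: return d; d += 1; return n  ('2 ≤ d' guard for termination)
def spfB (n d : Int) : Int :=
  if h : d * d ≤ n ∧ 2 ≤ d then
    if PySem.Int.mod n d = 0 then d else spfB n (d + 1)
  else n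
termination_by (n - d).toNat
decreasing_by
  obtain ⟨h1, h2⟩ := h
  have h3 : d + 2 ≤ n := by nlinarith
  omega

-- _strip: while n % p == 0: n //= p  (0 < n ∧ 2 ≤ p in the guard only makes it total)
def stripB (p n : Int) : Int :=
  if h : 0 < n ∧ 2 ≤ p ∧ PySem.Int.mod n p = 0 then stripB p (PySem.Int.floordiv n p) else n
termination_by n.toNat
decreasing_by exact pvStripDec n p h

-- facts cited by goB's decreasing_by
lemma spfB_dvd_ge (n d : Int) (hn : 2 ≤ n) (hd : 2 ≤ d) :
    spfB n d ∣ n ∧ 2 ≤ spfB n d := by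
  induction hk : (n - d).toNat using Nat.strong_induction_on generalizing d with
  | _ k ih =>
    rw [spfB]
    split
    · rename_i h
      split
      · rename_i hm
        exact ⟨(PySem.Int.mod_eq_zero_iff_dvd n d).mp hm, hd⟩
      · obtain ⟨h1, h2⟩ := h
        have h3 : d + 2 ≤ n := by nlinarith
        exact ih _ (by omega) (d + 1) (by omega) rfl
    · exact ⟨dvd_refl n, hn⟩

lemma stripB_pos_le (p n : Int) (hn : 0 < n) : 0 < stripB p n ∧ stripB p n ≤ n := by
  induction hx : n.toNat using Nat.strong_induction_on generalizing n with
  | _ m ih =>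
    rw [stripB]
    split
    · rename_i h
      have hd := pvStripDec n p h
      have h2 : 0 < PySem.Int.floordiv n p := by
        rw [PySem.Int.floordiv_eq_ediv_of_pos (by omega)]
        obtain ⟨hn0, hp, hm⟩ := h
        rcases (PySem.Int.mod_eq_zero_iff_dvd n p).mp hm with ⟨c, hc⟩
        have hc2 : c = n / p := by rw [hc, Int.mul_ediv_cancel_left c (by omega)]
        nlinarith [hc2 ▸ (by nlinarith [hc ▸ hn] : 0 < c)]
      have := ih _ (hx ▸ hd) (PySem.Int.floordiv n p) h2 rfl
      omega
    · exact ⟨hn, le_refl n⟩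

lemma stripB_lt (p n : Int) (hn : 2 ≤ n) (hp : 2 ≤ p) (hdvd : p ∣ n) : stripB p n < n := by
  rw [stripB]
  rw [dif_pos ⟨by omega, hp, (PySem.Int.mod_eq_zero_iff_dvd n p).mpr hdvd⟩]
  have h1 := (stripB_pos_le p (PySem.Int.floordiv n p) (by
    rw [PySem.Int.floordiv_eq_ediv_of_pos (by omega)]
    rcases hdvd with ⟨c, hc⟩
    have hc2 : c = n / p := by rw [hc, Int.mul_ediv_cancel_left c (by omega)]
    nlinarith [hc2 ▸ (by nlinarith : 0 < c)])).2
  have h2 : PySem.Int.floordiv n p < n := by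
    rw [PySem.Int.floordiv_eq_ediv_of_pos (by omega)]
    have := Int.ediv_lt_of_lt_mul (show (0:Int) < p by omega) (by nlinarith : n < n * p)
    omega
  omega

-- _go: if n == 1: return 1; p = _spf(n); return p * _go(_strip(p, n))
-- (reached only with n ≥ 1, where the '2 ≤ n' guard is exactly Python's 'n == 1' test; makes it total)
def goB (n : Int) : Int :=
  if h : 2 ≤ n then
    spfB n 2 * goB (stripB (spfB n 2) n)
  else 1
termination_by n.toNat
decreasing_by
  obtain ⟨hdvd, hp⟩ := spfB_dvd_ge n 2 h (by omega)
  have := stripB_lt (spfB n 2) n h hp hdvd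
  have h0 := (stripB_pos_le (spfB n 2) n (by omega)).1
  omega

def rad_alt (m : Int) : Int :=
  if m = 0 then 0 else if m < 2 then 1 else goB m

-- ===== PRECONDITION & SPEC =====
def Spec_rad (m : Int) (out : Int) : Prop := out = rad_alt m
instance (m : Int) (out : Int) : Decidable (Spec_rad m out) := by unfold Spec_rad; infer_instance

-- ===== CLAIM (what is proved, stated in full; the proofs are below) =====
def Claim_equal_rad : Prop := ∀ (m : Int), Dom_rad m → Spec_rad m (rad m)

-- ===== LEMMAS AND PROOFS =====

-- the radical of a natural number: product of its distinct prime factors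
def R (n : ℕ) : ℕ := ∏ p ∈ n.primeFactors, p

-- Nat mirror of the two (identical) strip loops
def stripNat (q a : ℕ) : ℕ :=
  if h : 0 < a ∧ 2 ≤ q ∧ a % q = 0 then stripNat q (a / q) else a
termination_by a
decreasing_by exact Nat.div_lt_self h.1 (by omega)

lemma stripA_natCast (q a : ℕ) : stripA (q:ℤ) (a:ℤ) = (stripNat q a : ℤ) := by
  induction a using Nat.strong_induction_on with
  | _ a ih =>
    rw [stripA, stripNat]
    have hg : (0 < (a:ℤ) ∧ 2 ≤ (q:ℤ) ∧ PySem.Int.mod (a:ℤ) (q:ℤ) = 0) ↔ (0 < a ∧ 2 ≤ q ∧ a % q = 0) := by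
      rw [PySem.Int.mod_natCast]
      constructor <;> (rintro ⟨h1, h2, h3⟩; exact ⟨by exact_mod_cast h1, by exact_mod_cast h2, by exact_mod_cast h3⟩)
    by_cases h : 0 < a ∧ 2 ≤ q ∧ a % q = 0
    · rw [dif_pos (hg.mpr h), dif_pos h, PySem.Int.floordiv_natCast]
      exact ih (a / q) (Nat.div_lt_self h.1 (by omega))
    · rw [dif_neg (fun hh => h (hg.mp hh)), dif_neg h]

lemma stripB_natCast (q a : ℕ) : stripB (q:ℤ) (a:ℤ) = (stripNat q a : ℤ) := by
  induction a using Nat.strong_induction_on with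
  | _ a ih =>
    rw [stripB, stripNat]
    have hg : (0 < (a:ℤ) ∧ 2 ≤ (q:ℤ) ∧ PySem.Int.mod (a:ℤ) (q:ℤ) = 0) ↔ (0 < a ∧ 2 ≤ q ∧ a % q = 0) := by
      rw [PySem.Int.mod_natCast]
      constructor <;> (rintro ⟨h1, h2, h3⟩; exact ⟨by exact_mod_cast h1, by exact_mod_cast h2, by exact_mod_cast h3⟩)
    by_cases h : 0 < a ∧ 2 ≤ q ∧ a % q = 0
    · rw [dif_pos (hg.mpr h), dif_pos h, PySem.Int.floordiv_natCast]
      exact ih (a / q) (Nat.div_lt_self h.1 (by omega))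
    · rw [dif_neg (fun hh => h (hg.mp hh)), dif_neg h]

-- the strip loop removes exactly the factor q from the radical
lemma stripNat_spec (q a : ℕ) (hq : q.Prime) (ha : 0 < a) :
    0 < stripNat q a ∧ stripNat q a ∣ a ∧ ¬ q ∣ stripNat q a ∧
      R a = (if q ∣ a then q else 1) * R (stripNat q a) := by
  induction a using Nat.strong_induction_on with
  | _ a ih =>
    rw [stripNat]
    by_cases h : 0 < a ∧ 2 ≤ q ∧ a % q = 0
    · rw [dif_pos h]
      have hdvd : q ∣ a := Nat.dvd_iff_mod_eq_zero.mpr h.2.2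
      set m := a / q with hm
      have ham : a = q * m := by rw [hm, Nat.mul_div_cancel' hdvd]
      have hm0 : 0 < m := by
        rcases Nat.eq_zero_or_pos m with h0 | h0
        · rw [h0, mul_zero] at ham; omega
        · exact h0
      have hmlt : m < a := by rw [ham]; nlinarith [hq.two_le]
      obtain ⟨ihpos, ihdvd, ihnd, ihR⟩ := ih m hmlt hm0
      have hpf : a.primeFactors = {q} ∪ m.primeFactors := by
        rw [ham, Nat.primeFactors_mul (by omega) (by omega), hq.primeFactors]
      refine ⟨ihpos, ihdvd.trans ⟨q, by rw [ham]; ring⟩, ihnd, ?_⟩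
      rw [if_pos hdvd]
      by_cases hqm : q ∣ m
      · have : a.primeFactors = m.primeFactors := by
          rw [hpf, Finset.singleton_union,
            Finset.insert_eq_self.mpr (Nat.mem_primeFactors.mpr ⟨hq, hqm, by omega⟩)]
        rw [R, this, ← R, ihR, if_pos hqm]
      · have hnotin : q ∉ m.primeFactors := fun hin => hqm (Nat.mem_primeFactors.mp hin).2.1
        rw [R, hpf, Finset.singleton_union, Finset.prod_insert hnotin, ← R, ihR, if_neg hqm]
        ring
    · rw [dif_neg h]
      have hnd : ¬ q ∣ a := by
        intro hd
        exact h ⟨ha, hq.two_le, Nat.dvd_iff_mod_eq_zero.mp hd⟩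
      exact ⟨ha, dvd_refl a, hnd, by rw [if_neg hnd, one_mul]⟩

-- B's trial-division loop finds the smallest prime factor
lemma spfB_eq_minFac (a d : ℕ) (ha : 2 ≤ a) (hd : 2 ≤ d) (hmin : d ≤ a.minFac) :
    spfB (a:ℤ) (d:ℤ) = (a.minFac : ℤ) := by
  induction hk : a - d using Nat.strong_induction_on generalizing d with
  | _ k ih =>
    rw [spfB]
    by_cases hg : d * d ≤ a
    · rw [dif_pos ⟨by exact_mod_cast hg, by exact_mod_cast hd⟩]
      by_cases hdvd : d ∣ a
      · rw [if_pos (by rw [PySem.Int.mod_eq_zero_iff_dvd]; exact_mod_cast hdvd)]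
        have := Nat.minFac_le_of_dvd hd hdvd
        exact_mod_cast congrArg (Nat.cast : ℕ → ℤ) (by omega : d = a.minFac)
      · rw [if_neg (by rw [PySem.Int.mod_eq_zero_iff_dvd]; exact_mod_cast hdvd)]
        have hda : d < a := by nlinarith
        have hne : a.minFac ≠ d := fun hh => hdvd (hh ▸ a.minFac_dvd)
        have : ((d:ℤ) + 1) = ((d + 1 : ℕ) : ℤ) := by push_cast; ring
        rw [this]
        exact ih (a - (d+1)) (by omega) (d+1) (by omega) (by omega) rfl
    · rw [dif_neg (fun hh => hg (by exact_mod_cast hh.1))]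
      have hprime : a.Prime := by
        by_contra hnp
        have := Nat.minFac_sq_le_self (by omega) hnp
        nlinarith [hmin]
      rw [hprime.minFac_eq]

lemma goB_spec (a : ℕ) (ha : 0 < a) : goB (a:ℤ) = (R a : ℤ) := by
  induction a using Nat.strong_induction_on with
  | _ a ih =>
    rw [goB]
    by_cases h2 : 2 ≤ a
    · rw [dif_pos (by exact_mod_cast h2)]
      have hp := Nat.minFac_prime (by omega : a ≠ 1)
      have hspf : spfB (a:ℤ) ((2:ℕ):ℤ) = (a.minFac : ℤ) :=
        spfB_eq_minFac a 2 h2 (le_refl 2) hp.two_le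
      have hspf' : spfB (a:ℤ) (2:ℤ) = (a.minFac : ℤ) := by exact_mod_cast hspf
      obtain ⟨hpos, hdvd, hnd, hR⟩ := stripNat_spec a.minFac a hp ha
      have hlt : stripNat a.minFac a < a := by
        have hne : stripNat a.minFac a ≠ a := by
          intro hh; apply hnd; rw [hh]; exact a.minFac_dvd
        have := Nat.le_of_dvd ha hdvd
        omega
      rw [hspf', stripB_natCast, ih _ hlt hpos, hR, if_pos a.minFac_dvd]
      push_cast; ring
    · have h1 : a = 1 := by omega
      subst h1
      rw [dif_neg (by norm_num)]
      simp [R, Nat.primeFactors_one]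

lemma loopA_spec (a q : ℕ) (r : ℤ) (ha : 0 < a) (hq : 2 ≤ q) (hpar : q = 2 ∨ q % 2 = 1)
    (hinv : ∀ t : ℕ, t.Prime → t < q → ¬ t ∣ a) :
    loopA (a:ℤ) (q:ℤ) r = r * (R a : ℤ) := by
  induction hk : a - q using Nat.strong_induction_on generalizing a q r with
  | _ k ih =>
    rw [loopA]
    by_cases hg : q * q ≤ a
    · rw [dif_pos ⟨by exact_mod_cast hg, by exact_mod_cast hq⟩]
      have hqa : q < a := by nlinarith
      have hq2 : ((if (q:ℤ) = 2 then 3 else (q:ℤ) + 2)) = (((if q = 2 then 3 else q + 2) : ℕ) : ℤ) := by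
        by_cases hq2 : q = 2
        · rw [if_pos hq2, if_pos (by exact_mod_cast hq2)]; norm_num
        · rw [if_neg hq2, if_neg (by exact_mod_cast fun hh => hq2 (by exact_mod_cast hh))]; push_cast; ring
      set q' := if q = 2 then 3 else q + 2 with hq'
      have hq'ge : q + 1 ≤ q' := by rw [hq']; split <;> omega
      have hq'par : q' = 2 ∨ q' % 2 = 1 := by
        rw [hq']; rcases hpar with h | h
        · rw [if_pos h]; omega
        · right; rw [if_neg (by omega)]; omega
      have hnotprime : ∀ t : ℕ, t.Prime → t < q' → t = q ∨ t < q := by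
        intro t ht hlt
        by_cases htq : t < q
        · exact Or.inr htq
        · left
          rcases hpar with h | h
          · omega
          · -- q odd, q' ≤ q + 2; t ∈ [q, q') minus q would be q+1, which is even > 2
            have hq'le : q' ≤ q + 2 := by rw [hq']; split <;> omega
            by_contra hne
            have ht1 : t = q + 1 := by omega
            have heven : 2 ∣ t := by omega
            have := (Nat.Prime.even_iff ht).mp (even_iff_two_dvd.mpr heven)
            omega
      by_cases hdvd : q ∣ a
      · rw [if_pos (by rw [PySem.Int.mod_eq_zero_iff_dvd]; exact_mod_cast hdvd)]
        -- under the invariant a divisor q of a must be prime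
        have hqprime : q.Prime := by
          have hmp := Nat.minFac_prime (by omega : q ≠ 1)
          have hmd : q.minFac ∣ a := (q.minFac_dvd).trans hdvd
          have : ¬ q.minFac < q := fun hlt => hinv _ hmp hlt hmd
          have := Nat.minFac_le (by omega : 0 < q)
          have : q.minFac = q := by omega
          exact this ▸ hmp
        obtain ⟨hpos, hsdvd, hnd, hR⟩ := stripNat_spec q a hqprime ha
        set s := stripNat q a with hs
        have hsle : s ≤ a := Nat.le_of_dvd ha hsdvd
        have hinv' : ∀ t : ℕ, t.Prime → t < q' → ¬ t ∣ s := by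
          intro t ht hlt htd
          rcases hnotprime t ht hlt with h | h
          · exact hnd (h ▸ htd)
          · exact hinv t ht h (htd.trans hsdvd)
        rw [stripA_natCast, hq2, ← hs,
          ih (s - q') (by omega) s q' (r * (q:ℤ)) hpos (by omega) hq'par hinv' rfl,
          hR, if_pos hdvd]
        push_cast; ring
      · rw [if_neg (by rw [PySem.Int.mod_eq_zero_iff_dvd]; exact_mod_cast hdvd)]
        have hinv' : ∀ t : ℕ, t.Prime → t < q' → ¬ t ∣ a := by
          intro t ht hlt htd
          rcases hnotprime t ht hlt with h | h
          · exact hdvd (h ▸ htd)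
          · exact hinv t ht h htd
        rw [hq2, ih (a - q') (by omega) a q' r ha (by omega) hq'par hinv' rfl]
    · rw [dif_neg (fun hh => hg (by exact_mod_cast hh.1))]
      by_cases h1 : 1 < a
      · rw [if_pos (by exact_mod_cast h1)]
        have hprime : a.Prime := by
          by_contra hnp
          have hsq := Nat.minFac_sq_le_self (by omega) hnp
          have hmp := Nat.minFac_prime (by omega : a ≠ 1)
          have : ¬ a.minFac < q := fun hlt => hinv _ hmp hlt a.minFac_dvd
          nlinarith [hsq]
        rw [R, hprime.primeFactors, Finset.prod_singleton]
      · rw [if_neg (by exact_mod_cast h1)]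
        have : a = 1 := by omega
        subst this
        simp [R, Nat.primeFactors_one]

-- ===== VERDICT (by name: the statement is the Claim_ definition above) =====
theorem rad_spec : Claim_equal_rad := by
  intro m _
  unfold Spec_rad rad rad_alt
  by_cases h0 : m = 0
  · rw [if_pos h0, if_pos h0]
  · rw [if_neg h0, if_neg h0]
    by_cases h2 : m < 2
    · rw [if_pos h2, loopA, dif_neg (by omega), if_neg (by omega)]
    · rw [if_neg h2]
      have hm : m = ((m.toNat : ℕ) : ℤ) := by omega
      rw [hm, show (2:ℤ) = ((2:ℕ):ℤ) from by norm_num, loopA_spec m.toNat 2 1 (by omega) (le_refl 2) (Or.inl rfl)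
        (fun t ht hlt _ => absurd ht.two_le (by omega)), goB_spec m.toNat (by omega), one_mul]
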